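-- pv_equiv track=rewrite | github.com/lakazatong/satis | tests/sim.py | group_values
-- ===== SOURCE A (Python) =====
-- def group_values(L):
-- 	grouped = False
-- 	i = 0
-- 	while i < len(L) - 1:
-- 		ref = L[i]
-- 		while i < len(L) - 1 and L[i + 1] == ref:
-- 			L[i] += L.pop(i + 1)
-- 			grouped = True
-- 		i += 1
-- 	return grouped
-- ===== SOURCE B (Python) =====
-- def group_values(L):
-- 	# Single pass: collapse each maximal run of equal values into its sum,
-- 	# assign the new list back in place, and report whether anything was merged.
-- 	out = []
-- 	i = 0
-- 	n = len(L)
-- 	while i < n: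
-- 		x = L[i]
-- 		s = x
-- 		i += 1
-- 		while i < n and L[i] == x:
-- 			s += L[i]
-- 			i += 1
-- 		out.append(s)
-- 	changed = len(out) != n
-- 	L[:] = out
-- 	return changed
-- ===== Notes on version B (the rewrite author's own statement) =====
-- stated objective: faster
-- what changed: A merges neighbours by repeatedly popping them out of the list (each pop shifts the whole tail) while rescanning with a while loop; B makes one linear pass that sums each maximal run of equal values into a fresh list, assigns it back with L[:] = out, and returns whether the length changed.
import Mathlib
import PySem

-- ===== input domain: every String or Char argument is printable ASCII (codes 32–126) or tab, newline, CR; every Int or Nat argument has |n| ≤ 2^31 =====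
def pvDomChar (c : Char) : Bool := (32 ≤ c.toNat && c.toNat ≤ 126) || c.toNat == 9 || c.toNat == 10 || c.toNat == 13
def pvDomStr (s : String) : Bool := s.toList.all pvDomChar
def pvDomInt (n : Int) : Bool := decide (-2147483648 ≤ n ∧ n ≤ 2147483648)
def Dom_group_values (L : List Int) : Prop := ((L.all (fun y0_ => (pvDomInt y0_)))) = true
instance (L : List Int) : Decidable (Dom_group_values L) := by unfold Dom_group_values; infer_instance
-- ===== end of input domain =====

-- B collapses runs in one pass instead of A's quadratic pop-based merging; the equivalence
-- proved is about the RETURN value only (both A and B mutate L in place).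

-- ===== PORT A =====
-- inner while: while i < len(L) - 1 and L[i + 1] == ref: L[i] += L.pop(i + 1); grouped = True
def gvInner (ref : Int) (i : Nat) (L : List Int) (g : Bool) : List Int × Bool :=
  if h : i + 1 < L.length ∧ L[i+1]! = ref then
    let v := L[i+1]!
    let L1 := L.eraseIdx (i+1)
    let L2 := L1.set i (L1[i]! + v)
    gvInner ref i L2 true
  else (L, g)
termination_by L.length
decreasing_by
  have h1 := h.1
  simp only [List.length_set, List.length_eraseIdx, if_pos h1]
  omega

theorem gvInner_len_le (ref : Int) (i : Nat) (L : List Int) (g : Bool) :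
    (gvInner ref i L g).1.length ≤ L.length := by
  fun_induction gvInner ref i L g with
  | case1 L g h v L1 L2 ih =>
    have h1 := h.1
    simp only [L2, L1, List.length_set, List.length_eraseIdx] at ih ⊢
    rw [if_pos h1] at ih
    omega
  | case2 => simp

-- outer while: while i < len(L) - 1: ref = L[i]; <inner>; i += 1
def gvOuter (L : List Int) (i : Nat) (g : Bool) : Bool :=
  if h : i + 1 < L.length then
    let ref := L[i]!
    let p := gvInner ref i L g
    gvOuter p.1 (i+1) p.2
  else g
termination_by L.length - i
decreasing_by
  have : (gvInner (L[i]!) i L g).1.length ≤ L.length := gvInner_len_le _ _ _ _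
  omega

def group_values (L : List Int) : Bool := gvOuter L 0 false

-- ===== PORT B =====
-- while i < len(L) and L[i] == x: s += L[i]; i += 1   (returns run sum and the rest)
def gvRun (x s : Int) (t : List Int) : Int × List Int :=
  match t with
  | [] => (s, [])
  | y :: r => if y = x then gvRun x (s + y) r else (s, y :: r)

theorem gvRun_len_le (x s : Int) (t : List Int) :
    (gvRun x s t).2.length ≤ t.length := by
  fun_induction gvRun x s t with
  | case1 => simp
  | case2 y r ih => simpa using Nat.le_succ_of_le ih
  | case3 y r h => simp

-- outer while: scan the run starting at position i, append its sum, continue at the rest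
def gvCollapse (L : List Int) : List Int :=
  match L with
  | [] => []
  | x :: t =>
    let p := gvRun x x t
    p.1 :: gvCollapse p.2
termination_by L.length
decreasing_by
  have : (gvRun x x t).2.length ≤ t.length := gvRun_len_le _ _ _
  simp_all

def group_values_alt (L : List Int) : Bool :=
  (gvCollapse L).length != L.length

-- ===== PRECONDITION & SPEC =====
def Spec_group_values (L : List Int) (out : Bool) : Prop := out = group_values_alt L
instance (L : List Int) (out : Bool) : Decidable (Spec_group_values L out) := by unfold Spec_group_values; infer_instance

-- ===== CLAIM (what is proved, stated in full; the proofs are below) =====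
def Claim_equal_group_values : Prop := ∀ (L : List Int), Dom_group_values L → Spec_group_values L (group_values L)

-- ===== LEMMAS AND PROOFS =====

-- adjacency test: true iff some adjacent pair of L at a position ≥ i is equal
def hasAdjFrom (L : List Int) (i : Nat) : Bool :=
  if i + 1 < L.length then (L[i]! == L[i+1]!) || hasAdjFrom L (i+1) else false
termination_by L.length - i

theorem gvInner_true (ref : Int) (i : Nat) (L : List Int) (g : Bool) (hg : g = true) :
    (gvInner ref i L g).2 = true := by
  fun_induction gvInner ref i L g <;> simp_all

theorem gvInner_noop (ref : Int) (i : Nat) (L : List Int) (g : Bool)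
    (h : ¬ (i + 1 < L.length ∧ L[i+1]! = ref)) : gvInner ref i L g = (L, g) := by
  rw [gvInner, dif_neg h]

theorem gvInner_fires (ref : Int) (i : Nat) (L : List Int) (g : Bool)
    (h : i + 1 < L.length ∧ L[i+1]! = ref) : (gvInner ref i L g).2 = true := by
  rw [gvInner, dif_pos h]
  exact gvInner_true _ _ _ _ rfl

theorem gvOuter_eq (L : List Int) (i : Nat) (g : Bool) :
    gvOuter L i g = (g || hasAdjFrom L i) := by
  fun_induction gvOuter L i g with
  | case1 L i g h ref p ih =>
    rw [hasAdjFrom, if_pos h]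
    by_cases hc : L[i+1]! = ref
    · have hp2 : p.2 = true := gvInner_fires ref i L g ⟨h, hc⟩
      have hbeq : (L[i]! == L[i+1]!) = true := by
        simp only [ref] at hc; simp [hc]
      rw [ih, hp2, hbeq]
      simp
    · have hp : p = (L, g) := gvInner_noop ref i L g (by intro hh; exact hc hh.2)
      rw [hp] at ih ⊢
      have hbeq : (L[i]! == L[i+1]!) = false := by
        simp only [ref] at hc
        simp only [beq_eq_false_iff_ne, ne_eq]
        intro he; exact hc he.symm
      simp only at ih ⊢
      rw [ih, hbeq]
      simp
  | case2 L i g h =>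
    rw [hasAdjFrom, if_neg h]
    simp

theorem hasAdjFrom_shift (x : Int) (t : List Int) (i : Nat) :
    hasAdjFrom (x :: t) (i + 1) = hasAdjFrom t i := by
  fun_induction hasAdjFrom t i with
  | case1 i h ih =>
    rw [hasAdjFrom, if_pos (by simp; omega)]
    rw [List.getElem!_cons_succ, List.getElem!_cons_succ, ih]
  | case2 i h =>
    rw [hasAdjFrom, if_neg (by simp; omega)]

theorem gvCollapse_len_le (L : List Int) : (gvCollapse L).length ≤ L.length := by
  fun_induction gvCollapse L with
  | case1 => simp
  | case2 x t p ih =>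
    have h1 : p.2.length ≤ t.length := gvRun_len_le x x t
    simp only [List.length_cons]
    omega

theorem gvCollapse_len (L : List Int) :
    ((gvCollapse L).length != L.length) = hasAdjFrom L 0 := by
  fun_induction gvCollapse L with
  | case1 => simp [hasAdjFrom]
  | case2 x t p ih =>
    simp only [p] at ih ⊢
    cases t with
    | nil => simp [gvRun, gvCollapse, hasAdjFrom]
    | cons y r =>
      by_cases hc : y = x
      · have h1 : ((gvRun x x (y :: r)).2).length ≤ r.length := by
          rw [gvRun, if_pos hc]; exact gvRun_len_le _ _ _
        have h2 := gvCollapse_len_le ((gvRun x x (y :: r)).2)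
        have hadj : hasAdjFrom (x :: y :: r) 0 = true := by
          rw [hasAdjFrom, if_pos (by simp)]
          simp [hc]
        rw [hadj]
        refine bne_iff_ne.mpr ?_
        simp only [List.length_cons, ne_eq]
        omega
      · have hg : gvRun x x (y :: r) = (x, y :: r) := by rw [gvRun, if_neg hc]
        rw [hg] at ih ⊢
        rw [hasAdjFrom, if_pos (by simp)]
        have hb : ((x :: y :: r)[0]! == (x :: y :: r)[1]!) = false := by
          simp only [List.getElem!_cons_zero, List.getElem!_cons_succ,
            beq_eq_false_iff_ne, ne_eq]
          intro he; exact hc he.symm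
        rw [hb, hasAdjFrom_shift, Bool.false_or]
        rw [Bool.eq_iff_iff] at ih ⊢
        simp only [bne_iff_ne, ne_eq, List.length_cons] at ih ⊢
        rw [Nat.add_right_cancel_iff]
        exact ih

-- ===== VERDICT (by name: the statement is the Claim_ definition above) =====
theorem group_values_spec : Claim_equal_group_values := by
  intro L _
  unfold Spec_group_values group_values group_values_alt
  rw [gvOuter_eq, Bool.false_or, ← gvCollapse_len]
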